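-- pv_equiv track=rewrite | github.com/schipeltaper/bsc_thesis_code | exponent/run_vfd.py | every_parent_exist
-- ===== SOURCE A (Python) =====
-- def every_parent_exist(nodes):
--     for node in nodes:
--         exists = False
--         for other_node in nodes:
--             if other_node[0] == node[2]:
--                 exists = True
--         if not exists and not node[2] == None:
--             return False
--     return True
-- ===== SOURCE B (Python) =====
-- def every_parent_exist(nodes):
--     ids = {n[0] for n in nodes}
--     parents = {n[2] for n in nodes if not n[2] == None}
--     return parents <= ids
-- ===== Notes on version B (the rewrite author's own statement) =====
-- stated objective: idiomatic
-- what changed: B replaces A's nested per-node scan with early return by building the set of ids and the set of non-None parents once and returning a single subset test parents <= ids.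
-- outside the precondition, e.g. on every_parent_exist([(1, None, 99), (2,)]): A returns False, B raises IndexError
import Mathlib
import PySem

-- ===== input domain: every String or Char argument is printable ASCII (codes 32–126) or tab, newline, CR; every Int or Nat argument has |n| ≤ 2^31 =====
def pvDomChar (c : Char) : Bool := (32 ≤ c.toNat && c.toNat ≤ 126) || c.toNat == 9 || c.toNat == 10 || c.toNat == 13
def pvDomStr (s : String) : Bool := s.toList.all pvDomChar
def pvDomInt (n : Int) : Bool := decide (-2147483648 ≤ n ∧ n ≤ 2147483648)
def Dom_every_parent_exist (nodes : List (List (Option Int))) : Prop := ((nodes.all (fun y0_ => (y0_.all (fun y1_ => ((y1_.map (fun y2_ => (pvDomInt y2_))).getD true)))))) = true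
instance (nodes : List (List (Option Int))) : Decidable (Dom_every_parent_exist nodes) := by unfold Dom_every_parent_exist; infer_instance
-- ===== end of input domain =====

-- B builds the id set and the non-None parent set once and returns one subset test, instead of A's
-- nested per-node scan with early return.

-- ===== PORT A =====
-- inner 'for other_node in nodes' loop: sets exists to True on a match
def aInner (all : List (List (Option Int))) (node : List (Option Int)) : Bool :=
  all.foldl (fun ex other =>
    if PySem.List.pyGet? other 0 == PySem.List.pyGet? node 2 then true else ex) false

-- outer 'for node in nodes' loop with early 'return False'
def aLoop (all : List (List (Option Int))) : List (List (Option Int)) → Bool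
  | [] => true
  | node :: tl =>
    let ex := aInner all node
    if !ex && !(PySem.List.pyGet? node 2 == some none) then false else aLoop all tl

def every_parent_exist (nodes : List (List (Option Int))) : Bool := aLoop nodes nodes

-- ===== PORT B =====
def every_parent_exist_alt (nodes : List (List (Option Int))) : Bool :=
  let ids : PySem.Set (Option (Option Int)) :=
    PySem.Set.ofList (nodes.map (fun n => PySem.List.pyGet? n 0))
  let parents : PySem.Set (Option (Option Int)) :=
    PySem.Set.ofList
      (((nodes.filter (fun n => !(PySem.List.pyGet? n 2 == some none))).map
        (fun n => PySem.List.pyGet? n 2)))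
  PySem.Set.issubset parents ids

-- ===== PRECONDITION & SPEC =====
-- Pre_ excludes inputs containing a node of length < 3: Python indexing n[0]/n[2] raises IndexError
-- there for both programs, except that A's early 'return False' can accidentally fire before the
-- short node's n[2] is touched (see the cite), where B's set comprehension still raises.
def Pre_every_parent_exist (nodes : List (List (Option Int))) : Prop :=
  ∀ n ∈ nodes, 3 ≤ n.length
instance (nodes : List (List (Option Int))) : Decidable (Pre_every_parent_exist nodes) := by
  unfold Pre_every_parent_exist; infer_instance

def pvWitness_every_parent_exist : List (List (Option Int)) :=
  [[some 1, none, none], [some 2, some 5, some 1]]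

def Spec_every_parent_exist (nodes : List (List (Option Int))) (out : Bool) : Prop := out = every_parent_exist_alt nodes
instance (nodes : List (List (Option Int))) (out : Bool) : Decidable (Spec_every_parent_exist nodes out) := by unfold Spec_every_parent_exist; infer_instance

-- ===== CLAIM (what is proved, stated in full; the proofs are below) =====
def Claim_equal_every_parent_exist : Prop := ∀ (nodes : List (List (Option Int))), Dom_every_parent_exist nodes → Pre_every_parent_exist nodes → Spec_every_parent_exist nodes (every_parent_exist nodes)

-- ===== LEMMAS AND PROOFS =====

theorem foldl_if_true {α : Type} (p : α → Bool) (l : List α) (b : Bool) :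
    l.foldl (fun ex o => if p o then true else ex) b = (b || l.any p) := by
  induction l generalizing b with
  | nil => simp
  | cons x xs ih =>
    simp only [List.foldl_cons, List.any_cons, ih]
    by_cases h : p x <;> simp [h]

theorem aInner_eq (all : List (List (Option Int))) (node : List (Option Int)) :
    aInner all node = all.any (fun o => PySem.List.pyGet? o 0 == PySem.List.pyGet? node 2) := by
  unfold aInner
  exact foldl_if_true (fun o => PySem.List.pyGet? o 0 == PySem.List.pyGet? node 2) all false

theorem aLoop_eq (all rest : List (List (Option Int))) :
    aLoop all rest =
      rest.all (fun node =>
        (PySem.List.pyGet? node 2 == some none) || aInner all node) := by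
  induction rest with
  | nil => rfl
  | cons node tl ih =>
    simp only [aLoop, List.all_cons, ih]
    by_cases h1 : aInner all node <;>
      by_cases h2 : (PySem.List.pyGet? node 2 == some none) <;> simp [h1, h2]

theorem every_parent_exist_eq_alt (nodes : List (List (Option Int))) :
    every_parent_exist nodes = every_parent_exist_alt nodes := by
  rw [Bool.eq_iff_iff]
  simp only [every_parent_exist, every_parent_exist_alt, aLoop_eq, aInner_eq,
    List.all_eq_true, List.any_eq_true, Bool.or_eq_true, PySem.Set.issubset_iff,
    PySem.Set.mem_ofList, List.mem_map, List.mem_filter, beq_iff_eq,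
    Bool.not_eq_eq_eq_not, Bool.not_true]
  constructor
  · rintro h x ⟨n, ⟨hn, hne⟩, rfl⟩
    rcases h n hn with h2 | ⟨o, ho, heq⟩
    · simp [h2] at hne
    · exact ⟨o, ho, heq⟩
  · intro h node hn
    by_cases h2 : PySem.List.pyGet? node 2 = some none
    · exact Or.inl h2
    · right
      rcases h _ ⟨node, ⟨hn, by simpa using h2⟩, rfl⟩ with ⟨o, ho, heq⟩
      exact ⟨o, ho, heq⟩

-- ===== VERDICT (by name: the statement is the Claim_ definition above) =====
theorem every_parent_exist_spec : Claim_equal_every_parent_exist := by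
  intro nodes _ _
  unfold Spec_every_parent_exist
  exact every_parent_exist_eq_alt nodes
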